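-- pv_equiv track=rewrite | github.com/photonixapp/photonix | photonix/classifiers/location/model.py | split_country_points
-- ===== SOURCE A (Python) =====
-- def split_country_points(points):
--     # The country shapes have multiple polygons within them. We split the
--     # polygons when we see the first point reoccur.
--     point_groups = []
--     pos = 0
--     try:
--         while True:
--             first_point = points[pos]
--             last_pos = points[pos + 1:].index(first_point) + pos + 1
--             point_groups.append(points[pos:last_pos])
--             pos = last_pos + 1
--
--             if pos >= len(points):
--                 break
--         return point_groups
--     except ValueError:  # No matching end point so return single polygon
--         return [points]
-- ===== SOURCE B (Python) =====
-- def split_country_points(points):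
--     # Precompute each position's next occurrence of the same value in one
--     # backward pass (last-seen dict), then jump between occurrences instead
--     # of rescanning tail slices.
--     n = len(points)
--     nxt = [None] * n
--     seen = {}
--     for i in range(n - 1, -1, -1):
--         nxt[i] = seen.get(points[i])
--         seen[points[i]] = i
--     groups = []
--     pos = 0
--     while True:
--         last = nxt[pos]
--         if last is None:
--             return [points]
--         groups.append(points[pos:last])
--         pos = last + 1
--         if pos >= n:
--             return groups
-- ===== Notes on version B (the rewrite author's own statement) =====
-- stated objective: alternative
-- what changed: Replaces the repeated tail-slice copies and .index rescans with a next-occurrence array precomputed in one backward pass using a last-seen dict; the grouping loop then jumps directly between occurrences.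
import Mathlib
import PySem

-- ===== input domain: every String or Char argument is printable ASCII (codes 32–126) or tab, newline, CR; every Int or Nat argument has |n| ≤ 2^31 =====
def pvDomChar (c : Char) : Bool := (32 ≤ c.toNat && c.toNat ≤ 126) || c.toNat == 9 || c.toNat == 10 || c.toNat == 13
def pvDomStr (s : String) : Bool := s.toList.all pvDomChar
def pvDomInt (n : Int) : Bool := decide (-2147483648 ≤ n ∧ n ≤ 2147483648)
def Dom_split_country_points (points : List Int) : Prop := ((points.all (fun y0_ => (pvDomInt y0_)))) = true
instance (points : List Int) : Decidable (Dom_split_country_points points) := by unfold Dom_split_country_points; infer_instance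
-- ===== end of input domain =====

-- B replaces A's repeated tail-slice + .index rescans with a next-occurrence
-- array built in one backward pass over a last-seen dict (objective: alternative).
-- Return-value equivalence only; neither program mutates its argument.

-- ===== PORT A =====
-- A's while-loop: at pos, find the next occurrence of points[pos] in points[pos+1:];
-- ValueError (index? = none) returns [points]; groups accumulate A's point_groups.
def splitLoopA (points : List Int) (pos : Nat) (groups : List (List Int)) : List (List Int) :=
  if h : pos < points.length then
    let fp := points[pos]
    match PySem.List.index? (PySem.List.slice points (some (((pos : Nat) : Int) + 1)) none) fp with
    | none => [points]
    | some idx =>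
      let lastPos := idx + pos + 1
      let groups' := groups ++ [PySem.List.slice points (some ((pos : Nat) : Int)) (some ((lastPos : Nat) : Int))]
      if lastPos + 1 ≥ points.length then groups'
      else splitLoopA points (lastPos + 1) groups'
  else []  -- IndexError: only reachable for points = [] (excluded by Pre_)
termination_by points.length - pos
decreasing_by omega

def split_country_points (points : List Int) : List (List Int) :=
  splitLoopA points 0 []

-- ===== PORT B =====
-- B's backward for-loop over range(n-1, -1, -1): nxt[i] = seen.get(points[i]);
-- seen[points[i]] = i.  The list is filled right-to-left, so it is built by
-- prepending the entry for index i-1 at each step (same values as Source B's nxt).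
def nxtLoopB (points : List Int) (i : Nat) (seen : PySem.Dict Int Int) (acc : List (Option Int)) : List (Option Int) :=
  match i with
  | 0 => acc
  | Nat.succ j =>
    let p := points.getD j 0
    nxtLoopB points j (seen.insert p ((j : Nat) : Int)) (seen.get? p :: acc)

-- B's while-loop: jump from pos to its precomputed next occurrence nxt[pos].
def splitLoopB (points : List Int) (nxt : List (Option Int)) (pos : Nat) (groups : List (List Int)) : List (List Int) :=
  match nxt[pos]? with
  | none => []  -- IndexError on nxt[pos]: only the empty input reaches this (excluded by Pre_)
  | some none => [points]
  | some (some last) =>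
    let groups' := groups ++ [PySem.List.slice points (some ((pos : Nat) : Int)) (some last)]
    if _h1 : last.toNat + 1 ≥ points.length then groups'
    else if _h2 : pos < last.toNat + 1 then splitLoopB points nxt (last.toNat + 1) groups'
    else []  -- totality guard; for the nxt built above nxt[pos] > pos always
termination_by points.length - pos
decreasing_by omega

def split_country_points_alt (points : List Int) : List (List Int) :=
  splitLoopB points (nxtLoopB points points.length PySem.Dict.empty []) 0 []

-- ===== PRECONDITION & SPEC =====
-- On the empty list both Pythons raise IndexError, so it is excluded.
def Pre_split_country_points (points : List Int) : Prop := points ≠ []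
instance (points : List Int) : Decidable (Pre_split_country_points points) := by
  unfold Pre_split_country_points; infer_instance

def pvWitness_split_country_points : List Int := [1, 2, 3, 1, 4, 4]

def Spec_split_country_points (points : List Int) (out : List (List Int)) : Prop := out = split_country_points_alt points
instance (points : List Int) (out : List (List Int)) : Decidable (Spec_split_country_points points out) := by unfold Spec_split_country_points; infer_instance

-- ===== CLAIM (what is proved, stated in full; the proofs are below) =====
def Claim_equal_split_country_points : Prop := ∀ (points : List Int), Dom_split_country_points points → Pre_split_country_points points → Spec_split_country_points points (split_country_points points)

-- ===== LEMMAS AND PROOFS =====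

-- Specification of B's nxt entries: first index ≥ k holding p, as a Python int.
def nextOcc (points : List Int) (p : Int) (k : Nat) : Option Int :=
  (PySem.List.index? (points.drop k) p).map (fun idx => (((k + idx : Nat)) : Int))

theorem nextOcc_step (points : List Int) (q : Int) (j : Nat) (hj : j < points.length) :
    nextOcc points q j =
      if q = points[j] then some ((j : Nat) : Int) else nextOcc points q (j + 1) := by
  unfold nextOcc
  rw [List.drop_eq_getElem_cons hj]
  by_cases hq : q = points[j]
  · subst hq
    rw [PySem.List.index?_cons_self, if_pos rfl]
    simp
  · rw [PySem.List.index?_cons_of_ne _ (fun h => hq h.symm), if_neg hq]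
    cases hidx : PySem.List.index? (points.drop (j + 1)) q with
    | none => rfl
    | some idx =>
      simp only [Option.map_some]
      congr 1
      push_cast
      ring

theorem nxtLoopB_spec (points : List Int) (i : Nat) (hi : i ≤ points.length)
    (seen : PySem.Dict Int Int) (acc : List (Option Int))
    (hseen : ∀ q, seen.get? q = nextOcc points q i) :
    nxtLoopB points i seen acc =
      ((List.range i).map (fun j => nextOcc points (points.getD j 0) (j + 1))) ++ acc := by
  induction i generalizing seen acc with
  | zero => simp [nxtLoopB]
  | succ j ih =>
    have hj : j < points.length := by omega
    have hgd : points.getD j 0 = points[j] := List.getD_eq_getElem points 0 hj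
    rw [nxtLoopB]
    have hinv : ∀ q, (seen.insert (points.getD j 0) ((j : Nat) : Int)).get? q = nextOcc points q j := by
      intro q
      rw [PySem.Dict.get?_insert, hgd, nextOcc_step points q j hj]
      by_cases hq : q = points[j]
      · rw [if_pos hq, if_pos hq]
      · rw [if_neg hq, if_neg hq, hseen]
    rw [ih (by omega) _ _ hinv, List.range_succ, List.map_append]
    simp [hseen]

theorem nxt_getElem? (points : List Int) (pos : Nat) (hpos : pos < points.length) :
    (nxtLoopB points points.length PySem.Dict.empty [])[pos]? =
      some (nextOcc points points[pos] (pos + 1)) := by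
  have hseen : ∀ q, (PySem.Dict.empty : PySem.Dict Int Int).get? q = nextOcc points q points.length := by
    intro q
    rw [PySem.Dict.get?_empty]
    unfold nextOcc
    rw [List.drop_length]
    rfl
  rw [nxtLoopB_spec points points.length le_rfl _ _ hseen, List.append_nil,
    List.getElem?_map, List.getElem?_range hpos]
  have hg : points[pos]?.getD 0 = points[pos] := by
    rw [List.getElem?_eq_getElem hpos]; rfl
  simp only [Option.map_some, List.getD, hg]

theorem loops_eq (points : List Int) (pos : Nat) (groups : List (List Int))
    (h : pos < points.length) :
    splitLoopA points pos groups =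
      splitLoopB points (nxtLoopB points points.length PySem.Dict.empty []) pos groups := by
  induction hn : points.length - pos using Nat.strong_induction_on generalizing pos groups with
  | _ n ih =>
    have e1 : ((pos : Int) + 1) = (((pos + 1 : Nat)) : Int) := by push_cast; ring
    rw [splitLoopA.eq_def, dif_pos h, splitLoopB.eq_def, nxt_getElem? points pos h]
    dsimp only
    rw [e1, PySem.List.slice_from_natCast]
    unfold nextOcc
    cases hidx : PySem.List.index? (points.drop (pos + 1)) points[pos] with
    | none => rfl
    | some idx =>
      dsimp only [Option.map_some]
      have elast : (((pos + 1 + idx : Nat) : Int)).toNat = idx + pos + 1 := by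
        rw [Int.toNat_natCast]; omega
      have ecast : ((pos + 1 + idx : Nat) : Int) = ((idx + pos + 1 : Nat) : Int) := by
        push_cast; ring
      rw [elast, ecast]
      by_cases hge : idx + pos + 1 + 1 ≥ points.length
      · rw [if_pos hge, dif_pos hge]
      · rw [if_neg hge, dif_neg hge, dif_pos (by omega : pos < idx + pos + 1 + 1)]
        exact ih (points.length - (idx + pos + 1 + 1)) (by omega) (idx + pos + 1 + 1)
          _ (by omega) rfl

-- ===== VERDICT (by name: the statement is the Claim_ definition above) =====
theorem split_country_points_spec : Claim_equal_split_country_points := by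
  intro points _ hpre
  have h : 0 < points.length := List.length_pos_iff.mpr hpre
  unfold Spec_split_country_points split_country_points split_country_points_alt
  exact loops_eq points 0 [] h
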